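-- pv_equiv track=rewrite | github.com/xinnan-tech/xiaozhi-esp32-server | libs/o-mem/memory_chain/memory_manager.py | event_topic_mapping
-- ===== SOURCE A (Python) =====
-- def event_topic_mapping(overall_topic_dict_list,event_list,target_topics_list):
--
--     event_topic_mapping_results = {}
--
--     for event in event_list:
--         for topic_info in overall_topic_dict_list:
--             if event in topic_info:
--                 if topic_info["group_name"] in target_topics_list:
--                     event_topic_mapping_results[event]=topic_info["group_name"]
--                     break
--     return event_topic_mapping_results
-- ===== SOURCE B (Python) =====
-- def event_topic_mapping(overall_topic_dict_list, event_list, target_topics_list):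
--     targets = set(target_topics_list)
--     index = {}
--     for topic_info in overall_topic_dict_list:
--         group = topic_info.get("group_name")
--         if group in targets:
--             for key in topic_info:
--                 index.setdefault(key, group)
--     pairs = []
--     emitted = set()
--     for event in event_list:
--         if event in index and event not in emitted:
--             emitted.add(event)
--             pairs.append((event, index[event]))
--     return dict(pairs)
-- ===== Notes on version B (the rewrite author's own statement) =====
-- stated objective: faster
-- what changed: Instead of rescanning every topic dict (with a linear membership test into target_topics_list) for every event, B builds an event->group index via setdefault in one ordered pass over the topic dicts with a precomputed target set, then emits (event, group) pairs in a single pass over the events with an emitted-set guard and returns dict(pairs); Pre_ excludes inputs where A raises KeyError (a scanned dict contains an event but has no 'group_name' key, with no earlier matching dict).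
import Mathlib
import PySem

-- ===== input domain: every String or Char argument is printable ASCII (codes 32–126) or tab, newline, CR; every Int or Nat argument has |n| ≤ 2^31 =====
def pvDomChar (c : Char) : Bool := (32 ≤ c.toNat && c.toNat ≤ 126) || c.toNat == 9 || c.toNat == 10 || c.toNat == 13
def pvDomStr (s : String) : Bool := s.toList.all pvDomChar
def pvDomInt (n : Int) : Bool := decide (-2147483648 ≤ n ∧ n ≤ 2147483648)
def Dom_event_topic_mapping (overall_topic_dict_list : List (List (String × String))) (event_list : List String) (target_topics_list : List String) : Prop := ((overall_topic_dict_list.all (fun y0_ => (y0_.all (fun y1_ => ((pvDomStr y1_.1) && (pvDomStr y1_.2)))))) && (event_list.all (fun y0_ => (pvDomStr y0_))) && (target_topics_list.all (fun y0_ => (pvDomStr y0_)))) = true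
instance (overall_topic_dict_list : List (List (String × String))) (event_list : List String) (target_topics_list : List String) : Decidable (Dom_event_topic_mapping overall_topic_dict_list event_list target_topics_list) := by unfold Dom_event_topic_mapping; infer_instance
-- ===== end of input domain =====

-- B replaces A's per-event rescan of all topic dicts with one ordered pass building an
-- event->group index (setdefault: first writer wins), then a single pass over the events that
-- emits each matched event once, guarded by an emitted set; same return value on every input
-- where A returns (Pre_ excludes A's KeyError inputs).


-- ===== PORT A =====
-- inner loop of A for one event: first dict containing the event whose "group_name" is in targets
-- (the 'none' branch of the group_name lookup is where Python raises KeyError; Pre_ excludes it)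
def aFind (overall_topic_dict_list : List (List (String × String))) (event : String) (target_topics_list : List String) : Option String :=
  match overall_topic_dict_list with
  | [] => none
  | d :: rest =>
    if (List.lookup event d).isSome then
      match List.lookup "group_name" d with
      | some g => if target_topics_list.contains g then some g else aFind rest event target_topics_list
      | none => aFind rest event target_topics_list
    else aFind rest event target_topics_list

def event_topic_mapping (overall_topic_dict_list : List (List (String × String))) (event_list : List String) (target_topics_list : List String) : List (String × String) :=
  (event_list.foldl (fun (acc : PySem.Dict String String) e =>
      match aFind overall_topic_dict_list e target_topics_list with
      | some g => acc.insert e g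
      | none => acc) PySem.Dict.empty).items

-- ===== PORT B =====
-- one ordered pass over the topic dicts: event -> group index, setdefault = first writer wins
def bIndex (overall_topic_dict_list : List (List (String × String))) (target_topics_list : List String) : PySem.Dict String String :=
  overall_topic_dict_list.foldl (fun idx d =>
    match List.lookup "group_name" d with
    | some group =>
      if target_topics_list.contains group then
        d.foldl (fun idx kv => idx.setdefault kv.1 group) idx
      else idx
    | none => idx) PySem.Dict.empty

-- second pass: emit each matched event once, in first-occurrence order; dict(pairs) at the end
def event_topic_mapping_alt (overall_topic_dict_list : List (List (String × String))) (event_list : List String) (target_topics_list : List String) : List (String × String) :=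
  let idx := bIndex overall_topic_dict_list target_topics_list
  let st := event_list.foldl (fun (st : List (String × String) × PySem.Set String) event =>
      if idx.contains event && !(PySem.Set.contains st.2 event) then
        (st.1 ++ [(event, idx.getD event "")], PySem.Set.add st.2 event)
      else st) ([], PySem.Set.empty)
  (PySem.Dict.ofList st.1).items

-- ===== PRECONDITION & SPEC =====
-- Pre_ excludes exactly the inputs on which A raises KeyError: some event is a key of a scanned
-- topic dict that has no "group_name" key, and no earlier dict already matched that event.
def Pre_event_topic_mapping (overall_topic_dict_list : List (List (String × String))) (event_list : List String) (target_topics_list : List String) : Prop :=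
  ∀ e ∈ event_list, ∀ p ∈ overall_topic_dict_list.zipIdx,
    (List.lookup e p.1).isSome → (List.lookup "group_name" p.1).isSome ∨
      ∃ q ∈ overall_topic_dict_list.zipIdx, q.2 < p.2 ∧ (List.lookup e q.1).isSome ∧
        ∃ g, List.lookup "group_name" q.1 = some g ∧ g ∈ target_topics_list

instance (overall_topic_dict_list : List (List (String × String))) (event_list : List String) (target_topics_list : List String) : Decidable (Pre_event_topic_mapping overall_topic_dict_list event_list target_topics_list) := by unfold Pre_event_topic_mapping; infer_instance

def pvWitness_event_topic_mapping : (List (List (String × String))) × List String × List String :=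
  ([[("a", "1"), ("group_name", "g1")], [("b", "2"), ("group_name", "g2")]], ["a", "b", "c"], ["g1"])

def Spec_event_topic_mapping (overall_topic_dict_list : List (List (String × String))) (event_list : List String) (target_topics_list : List String) (out : List (String × String)) : Prop := out = event_topic_mapping_alt overall_topic_dict_list event_list target_topics_list
instance (overall_topic_dict_list : List (List (String × String))) (event_list : List String) (target_topics_list : List String) (out : List (String × String)) : Decidable (Spec_event_topic_mapping overall_topic_dict_list event_list target_topics_list out) := by unfold Spec_event_topic_mapping; infer_instance

-- ===== CLAIM (what is proved, stated in full; the proofs are below) =====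
def Claim_equal_event_topic_mapping : Prop := ∀ (overall_topic_dict_list : List (List (String × String))) (event_list : List String) (target_topics_list : List String), Dom_event_topic_mapping overall_topic_dict_list event_list target_topics_list → Pre_event_topic_mapping overall_topic_dict_list event_list target_topics_list → Spec_event_topic_mapping overall_topic_dict_list event_list target_topics_list (event_topic_mapping overall_topic_dict_list event_list target_topics_list)

-- ===== LEMMAS AND PROOFS =====

theorem inner_get? (d : List (String × String)) (idx : PySem.Dict String String) (g e : String) :
    (d.foldl (fun idx kv => idx.setdefault kv.1 g) idx).get? e =
      (idx.get? e).or (if (List.lookup e d).isSome then some g else none) := by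
  induction d generalizing idx with
  | nil => simp
  | cons kv rest ih =>
    obtain ⟨k, v⟩ := kv
    simp only [List.foldl]
    rw [ih]
    by_cases he : e = k
    · subst he
      have hl : List.lookup e ((e, v) :: rest) = some v := by simp [List.lookup]
      rw [hl]
      by_cases hc : idx.contains e = true
      · rw [PySem.Dict.setdefault_of_contains _ _ hc]
        rw [PySem.Dict.contains_eq_isSome_get?] at hc
        cases hg : idx.get? e with
        | none => rw [hg] at hc; simp at hc
        | some w => simp
      · rw [PySem.Dict.setdefault_of_not_contains _ _ (by simpa using hc)]
        rw [PySem.Dict.contains_eq_isSome_get?] at hc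
        cases hg : idx.get? e with
        | some w => rw [hg] at hc; simp at hc
        | none => simp [PySem.Dict.get?_insert_self]
    · have hbe : (e == k) = false := beq_eq_false_iff_ne.mpr he
      have hl : List.lookup e ((k, v) :: rest) = List.lookup e rest := by
        simp [List.lookup, hbe]
      rw [hl]
      by_cases hc : idx.contains k = true
      · rw [PySem.Dict.setdefault_of_contains _ _ hc]
      · rw [PySem.Dict.setdefault_of_not_contains _ _ (by simpa using hc),
          PySem.Dict.get?_insert, if_neg he]

theorem bIndex_get? (tl : List (List (String × String))) (targets : List String) (idx : PySem.Dict String String) (e : String) :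
    (tl.foldl (fun idx d =>
        match List.lookup "group_name" d with
        | some group =>
          if targets.contains group then
            d.foldl (fun idx kv => idx.setdefault kv.1 group) idx
          else idx
        | none => idx) idx).get? e = (idx.get? e).or (aFind tl e targets) := by
  induction tl generalizing idx with
  | nil => simp [aFind]
  | cons d rest ih =>
    simp only [List.foldl]
    cases hg : List.lookup "group_name" d with
    | none =>
      rw [ih]
      simp [aFind, hg]
    | some g =>
      by_cases ht : targets.contains g = true
      · simp only [ht, if_true]
        rw [ih, inner_get?, Option.or_assoc]
        congr 1
        have htm : g ∈ targets := by simpa using ht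
        by_cases hl : (List.lookup e d).isSome = true <;> simp [aFind, hg, htm, hl]
      · simp only [ht]
        rw [ih]
        have htm : g ∉ targets := by simpa using ht
        simp [aFind, hg, htm]

-- main loop correspondence: A's dict-building loop vs B's pairs-with-emitted-set loop
theorem main_loop (f : String → Option String) (el : List String)
    (d : PySem.Dict String String) (s : PySem.Set String)
    (hnd : d.keys.Nodup)
    (hd : ∀ k v, d.get? k = some v → f k = some v)
    (hs : ∀ k, PySem.Set.contains s k = d.contains k) :
    (el.foldl (fun acc e => match f e with | some g => acc.insert e g | none => acc) d).items
    = (el.foldl (fun (st : List (String × String) × PySem.Set String) e =>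
        if (f e).isSome && !(PySem.Set.contains st.2 e) then
          (st.1 ++ [(e, (f e).getD "")], PySem.Set.add st.2 e)
        else st) (d.items, s)).1 := by
  induction el generalizing d s with
  | nil => simp
  | cons e rest ih =>
    simp only [List.foldl]
    cases hf : f e with
    | none =>
      simp only [Option.isSome_none, Bool.false_and, if_neg (by simp : ¬(false = true))]
      exact ih d s hnd hd hs
    | some g =>
      by_cases hc : d.contains e = true
      · -- event already recorded: A overwrites with the same value, B skips
        have hsc : PySem.Set.contains s e = true := (hs e).trans hc
        have hget : d.get? e = some g := by
          rw [PySem.Dict.contains_eq_isSome_get?] at hc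
          cases hw : d.get? e with
          | none => rw [hw] at hc; simp at hc
          | some w =>
            have h2 := hd e w hw
            rw [hf] at h2
            obtain rfl : g = w := by injection h2
            rfl
        have hins : d.insert e g = d := by
          apply PySem.Dict.ext
          rw [PySem.Dict.items_insert_of_contains _ _ hc]
          apply (List.map_congr_left ?_).trans (List.map_id d.items)
          intro p hp
          obtain ⟨pk, pv⟩ := p
          by_cases hpe : (pk == e) = true
          · have hpe' : pk = e := by simpa using hpe
            have hmem : d.get? pk = some pv := PySem.Dict.get?_of_mem_items _ (by simpa using hp) hnd
            rw [hpe', hget] at hmem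
            obtain rfl : g = pv := by injection hmem
            rw [if_pos hpe, hpe']
            rfl
          · rw [if_neg hpe]
            rfl
        simp only [hsc, Bool.not_true, Bool.and_false, if_neg (by simp : ¬(false = true))]
        rw [hins]
        exact ih d s hnd hd hs
      · -- fresh event: A appends to the dict, B appends a pair and marks it emitted
        have hc' : d.contains e = false := by simpa using hc
        have hsc : PySem.Set.contains s e = false := (hs e).trans hc'
        simp only [hsc, Option.isSome_some, Bool.not_false, Bool.and_true,
          Option.getD_some]
        have hitems := PySem.Dict.items_insert_of_not_contains d g hc'
        rw [← hitems]
        apply ih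
        · exact PySem.Dict.nodup_keys_insert d e g hnd
        · intro k v hk
          rw [PySem.Dict.get?_insert] at hk
          by_cases hke : k = e
          · rw [if_pos hke] at hk
            obtain rfl : g = v := by injection hk
            rw [hke, hf]
          · rw [if_neg hke] at hk
            exact hd k v hk
        · intro k
          rw [PySem.Dict.contains_insert]
          by_cases hke : k = e
          · rw [hke]
            simp [PySem.Set.contains_eq_listContains, PySem.Set.add_eq_ite]
            by_cases hm : e ∈ s <;> simp [hm]
          · have : (k == e) = false := beq_eq_false_iff_ne.mpr hke
            rw [this, Bool.false_or, ← hs k]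
            simp [PySem.Set.contains_eq_listContains, PySem.Set.add_eq_ite]
            by_cases hm : e ∈ s <;> simp [hm, hke]



theorem ofList_items_of_nodup (ps : List (String × String)) (h : (ps.map Prod.fst).Nodup) :
    (PySem.Dict.ofList ps).items = ps := by
  have := PySem.Dict.items_foldl_insert_fresh ps Prod.fst Prod.snd PySem.Dict.empty (by simp) h
  simpa [PySem.Dict.ofList, PySem.Dict.update] using this

theorem nodupA_keys (f : String → Option String) (el : List String) (d : PySem.Dict String String)
    (h : d.keys.Nodup) :
    (el.foldl (fun acc e => match f e with | some g => acc.insert e g | none => acc) d).keys.Nodup := by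
  induction el generalizing d with
  | nil => exact h
  | cons e rest ih =>
    simp only [List.foldl]
    cases hf : f e with
    | none => exact ih d h
    | some g => exact ih _ (PySem.Dict.nodup_keys_insert d e g h)

-- ===== VERDICT (by name: the statement is the Claim_ definition above) =====
theorem event_topic_mapping_spec : Claim_equal_event_topic_mapping := by
  intro tl el targets _ _

  unfold Spec_event_topic_mapping event_topic_mapping
  simp only [event_topic_mapping_alt]
  have hfind : ∀ e, aFind tl e targets = (bIndex tl targets).get? e := by
    intro e
    rw [bIndex, bIndex_get?]
    simp
  have hA : el.foldl (fun (acc : PySem.Dict String String) e =>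
        match aFind tl e targets with | some g => acc.insert e g | none => acc) PySem.Dict.empty
      = el.foldl (fun acc e =>
        match (bIndex tl targets).get? e with | some g => acc.insert e g | none => acc) PySem.Dict.empty := by
    apply PySem.List.foldl_congr_mem
    intro acc e _
    rw [hfind e]
  rw [hA]
  have hB : (fun (st : List (String × String) × PySem.Set String) e =>
        if (bIndex tl targets).contains e && !(PySem.Set.contains st.2 e) then
          (st.1 ++ [(e, (bIndex tl targets).getD e "")], PySem.Set.add st.2 e)
        else st)
      = (fun st e =>
        if ((bIndex tl targets).get? e).isSome && !(PySem.Set.contains st.2 e) then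
          (st.1 ++ [(e, ((bIndex tl targets).get? e).getD "")], PySem.Set.add st.2 e)
        else st) := by
    funext st e
    rw [PySem.Dict.contains_eq_isSome_get?, PySem.Dict.getD_eq_get?_getD]
  rw [hB]
  have hmain := main_loop (fun e => (bIndex tl targets).get? e) el PySem.Dict.empty PySem.Set.empty
    (by simp) (by simp) (by simp)
  rw [show (PySem.Dict.empty : PySem.Dict String String).items = [] from rfl] at hmain
  rw [← hmain]
  have hnodup : (((el.foldl (fun (acc : PySem.Dict String String) e =>
        match (bIndex tl targets).get? e with | some g => acc.insert e g | none => acc)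
        PySem.Dict.empty).items).map Prod.fst).Nodup := by
    have := nodupA_keys (fun e => (bIndex tl targets).get? e) el PySem.Dict.empty (by simp)
    simpa [PySem.Dict.keys] using this
  rw [ofList_items_of_nodup _ hnodup]
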